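-- pv_equiv track=rewrite | github.com/ASNKMGSK/GongMo | V2-agentcore-a2a-workshop/packages/agentcore-agents/qa-pipeline/v2/agents/shinhan_dept/_base.py | _snap_to_steps
-- ===== SOURCE A (Python) =====
-- def _snap_to_steps(raw_score: int, allowed_steps: list[int]) -> int:
--     """raw_score 를 allowed_steps 중 가장 가까운 값으로 변환.
--
--     동률이면 더 낮은 단계 선택 (보수적 채점).
--     """
--     if not allowed_steps:
--         return raw_score
--     sorted_steps = sorted(allowed_steps, reverse=True)
--     best = sorted_steps[-1]  # 0
--     best_diff = abs(raw_score - best)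
--     for step in sorted_steps:
--         diff = abs(raw_score - step)
--         if diff < best_diff or (diff == best_diff and step < best):
--             best = step
--             best_diff = diff
--     return best
-- ===== SOURCE B (Python) =====
-- def _snap_to_steps(raw_score: int, allowed_steps: list[int]) -> int:
--     """Single linear pass: pick the step minimising (abs diff, step); no sort."""
--     if not allowed_steps:
--         return raw_score
--     return min(allowed_steps, key=lambda s: (abs(raw_score - s), s))
-- ===== Notes on version B (the rewrite author's own statement) =====
-- stated objective: faster
-- what changed: Replaces sort-then-scan (sorted descending, init from the minimum, linear scan) with a single linear min() over the original list keyed by (abs difference, step), dropping the O(n log n) sort.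
import Mathlib
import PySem

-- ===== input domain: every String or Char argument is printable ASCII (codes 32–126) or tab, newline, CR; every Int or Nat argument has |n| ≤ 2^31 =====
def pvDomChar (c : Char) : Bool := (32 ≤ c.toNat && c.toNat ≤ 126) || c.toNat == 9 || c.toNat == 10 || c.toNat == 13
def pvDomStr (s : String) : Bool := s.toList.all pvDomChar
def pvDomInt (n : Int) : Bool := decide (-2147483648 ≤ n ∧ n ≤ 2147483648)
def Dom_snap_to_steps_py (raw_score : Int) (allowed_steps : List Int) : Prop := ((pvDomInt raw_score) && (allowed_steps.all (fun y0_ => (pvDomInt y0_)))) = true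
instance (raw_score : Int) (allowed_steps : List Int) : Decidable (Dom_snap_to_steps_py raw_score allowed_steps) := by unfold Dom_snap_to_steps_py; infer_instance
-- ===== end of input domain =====

-- B drops A's sort: a single linear pass (Python min with key (abs diff, step)) picks the same step.


-- ===== PORT A =====
-- literal port of A: guard, sort descending, best = sorted_steps[-1], then the scan updating (best, best_diff)
def snap_to_steps_py (raw_score : Int) (allowed_steps : List Int) : Int :=
  if allowed_steps = [] then raw_score
  else
    let sorted_steps := PySem.List.sorted allowed_steps (fun x => x) true
    let best := PySem.List.pyGetD sorted_steps (-1) 0   -- sorted_steps[-1]; sorted_steps ≠ [] here, so the default is never used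
    let best_diff := |raw_score - best|
    let res := sorted_steps.foldl
      (fun (p : Int × Int) step =>
        let diff := |raw_score - step|
        if diff < p.2 ∨ (diff = p.2 ∧ step < p.1) then (step, diff) else p)
      (best, best_diff)
    res.1

-- ===== PORT B =====
-- literal port of B: empty guard, then min(allowed_steps, key=lambda s: (abs(raw_score - s), s))
def snap_to_steps_py_alt (raw_score : Int) (allowed_steps : List Int) : Int :=
  if allowed_steps = [] then raw_score
  else
    match PySem.List.min2? allowed_steps (fun s => |raw_score - s|) (fun s => s) with
    | some m => m
    | none => raw_score

-- ===== PRECONDITION & SPEC =====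
def Spec_snap_to_steps_py (raw_score : Int) (allowed_steps : List Int) (out : Int) : Prop := out = snap_to_steps_py_alt raw_score allowed_steps
instance (raw_score : Int) (allowed_steps : List Int) (out : Int) : Decidable (Spec_snap_to_steps_py raw_score allowed_steps out) := by unfold Spec_snap_to_steps_py; infer_instance

-- ===== CLAIM (what is proved, stated in full; the proofs are below) =====
def Claim_equal_snap_to_steps_py : Prop := ∀ (raw_score : Int) (allowed_steps : List Int), Dom_snap_to_steps_py raw_score allowed_steps → Spec_snap_to_steps_py raw_score allowed_steps (snap_to_steps_py raw_score allowed_steps)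

-- ===== LEMMAS AND PROOFS =====

-- strict lexicographic order on the key (abs difference, step) both programs minimise
def pvKeyLt (r a b : Int) : Prop := |r - a| < |r - b| ∨ (|r - a| = |r - b| ∧ a < b)

-- "m is the (unique) best step of l for raw score r"
def pvIsBest (r : Int) (l : List Int) (m : Int) : Prop := m ∈ l ∧ ∀ s ∈ l, ¬ pvKeyLt r s m

theorem pvIsBest_unique (r : Int) (l : List Int) (m₁ m₂ : Int)
    (h₁ : pvIsBest r l m₁) (h₂ : pvIsBest r l m₂) : m₁ = m₂ := by
  have a := h₁.2 m₂ h₂.1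
  have b := h₂.2 m₁ h₁.1
  unfold pvKeyLt at a b
  omega

-- invariant of A's scan: starting from any (b, |r-b|), the fold result stays inside b :: t …
theorem pvFoldA (r : Int) (t : List Int) : ∀ (b : Int),
    (t.foldl
      (fun (p : Int × Int) step =>
        if |r - step| < p.2 ∨ (|r - step| = p.2 ∧ step < p.1) then (step, |r - step|) else p)
      (b, |r - b|)).1 = b ∨
    (t.foldl
      (fun (p : Int × Int) step =>
        if |r - step| < p.2 ∨ (|r - step| = p.2 ∧ step < p.1) then (step, |r - step|) else p)
      (b, |r - b|)).1 ∈ t := by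
  induction t with
  | nil => intro b; simp
  | cons x xs ih =>
    intro b
    simp only [List.foldl_cons]
    split_ifs with h
    · rcases ih x with h' | h' <;> simp [h']
    · rcases ih b with h' | h' <;> simp [h']

-- … and is key-minimal among b and the elements of t
theorem pvFoldA_min (r : Int) (t : List Int) : ∀ (b : Int) (s : Int), (s = b ∨ s ∈ t) →
    ¬ pvKeyLt r s (t.foldl
      (fun (p : Int × Int) step =>
        if |r - step| < p.2 ∨ (|r - step| = p.2 ∧ step < p.1) then (step, |r - step|) else p)
      (b, |r - b|)).1 := by
  induction t with
  | nil =>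
    intro b s hs
    simp only [List.mem_nil_iff, or_false] at hs
    subst hs
    simp only [List.foldl_nil]
    unfold pvKeyLt
    omega
  | cons x xs ih =>
    intro b s hs
    simp only [List.foldl_cons]
    split_ifs with h
    · rcases hs with hs | hs
      · subst hs
        intro hc
        have hbx := ih x x (Or.inl rfl)
        unfold pvKeyLt at hc hbx
        omega
      · rcases List.mem_cons.mp hs with hs | hs
        · subst hs; exact ih s s (Or.inl rfl)
        · exact ih x s (Or.inr hs)
    · rcases hs with hs | hs
      · subst hs; exact ih s s (Or.inl rfl)
      · rcases List.mem_cons.mp hs with hs | hs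
        · subst hs
          intro hc
          have hbb := ih b b (Or.inl rfl)
          unfold pvKeyLt at hc hbb
          omega
        · exact ih b s (Or.inr hs)

theorem pvA_best (r : Int) (l : List Int) (h : l ≠ []) : pvIsBest r l (snap_to_steps_py r l) := by
  have hdef : snap_to_steps_py r l =
      ((PySem.List.sorted l (fun x => x) true).foldl
        (fun (p : Int × Int) step =>
          if |r - step| < p.2 ∨ (|r - step| = p.2 ∧ step < p.1) then (step, |r - step|) else p)
        (PySem.List.pyGetD (PySem.List.sorted l (fun x => x) true) (-1) 0,
         |r - PySem.List.pyGetD (PySem.List.sorted l (fun x => x) true) (-1) 0|)).1 := by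
    unfold snap_to_steps_py
    rw [if_neg h]
  rw [hdef]
  have hssne : PySem.List.sorted l (fun x => x) true ≠ [] := by
    intro hc
    exact h ((PySem.List.sorted_eq_nil_iff l (fun x => x) true).mp hc)
  have hmem : ∀ x, x ∈ PySem.List.sorted l (fun y => y) true ↔ x ∈ l :=
    fun x => PySem.List.mem_sorted l (fun y => y) true x
  have hb : PySem.List.pyGetD (PySem.List.sorted l (fun x => x) true) (-1) 0
      ∈ PySem.List.sorted l (fun x => x) true := by
    rw [PySem.List.pyGetD_neg_one _ 0 hssne]
    exact List.getLast_mem hssne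
  constructor
  · rcases pvFoldA r (PySem.List.sorted l (fun x => x) true)
      (PySem.List.pyGetD (PySem.List.sorted l (fun x => x) true) (-1) 0) with h' | h'
    · rw [← hmem]; rw [h']; exact hb
    · rw [← hmem]; exact h'
  · intro s hs
    exact pvFoldA_min r (PySem.List.sorted l (fun x => x) true)
      (PySem.List.pyGetD (PySem.List.sorted l (fun x => x) true) (-1) 0) s
      (Or.inr ((hmem s).mpr hs))

-- invariant of B's min2? fold: from some m it returns the key-minimum of m :: t
theorem pvFoldB (r : Int) (t : List Int) : ∀ (m : Int),
    ∃ m', (t.foldl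
      (fun (acc : Option Int) x =>
        match acc with
        | none => some x
        | some mm =>
          if (decide (|r - x| < |r - mm|) || !decide (|r - mm| < |r - x|) && decide (x < mm)) = true
          then some x else some mm)
      (some m)) = some m' ∧ (m' = m ∨ m' ∈ t) ∧ ∀ s, (s = m ∨ s ∈ t) → ¬ pvKeyLt r s m' := by
  induction t with
  | nil =>
    intro m
    refine ⟨m, rfl, Or.inl rfl, ?_⟩
    intro s hs
    simp only [List.mem_nil_iff, or_false] at hs
    subst hs
    unfold pvKeyLt
    omega
  | cons x xs ih =>
    intro m
    simp only [List.foldl_cons]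
    by_cases h : (decide (|r - x| < |r - m|) || !decide (|r - m| < |r - x|) && decide (x < m)) = true
    · rw [if_pos h]
      obtain ⟨m', hm', hmem, hmin⟩ := ih x
      refine ⟨m', hm', ?_, ?_⟩
      · rcases hmem with h' | h' <;> simp [h']
      · intro s hs
        rcases hs with hs | hs
        · subst hs
          intro hc
          have hxm := hmin x (Or.inl rfl)
          simp only [Bool.or_eq_true, Bool.and_eq_true, Bool.not_eq_true', decide_eq_true_eq,
            decide_eq_false_iff_not] at h
          unfold pvKeyLt at hc hxm
          omega
        · rcases List.mem_cons.mp hs with hs | hs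
          · subst hs; exact hmin s (Or.inl rfl)
          · exact hmin s (Or.inr hs)
    · rw [if_neg h]
      obtain ⟨m', hm', hmem, hmin⟩ := ih m
      refine ⟨m', hm', ?_, ?_⟩
      · rcases hmem with h' | h' <;> simp [h']
      · intro s hs
        rcases hs with hs | hs
        · subst hs; exact hmin s (Or.inl rfl)
        · rcases List.mem_cons.mp hs with hs | hs
          · subst hs
            intro hc
            have hmm := hmin m (Or.inl rfl)
            simp only [Bool.or_eq_true, Bool.and_eq_true, Bool.not_eq_true', decide_eq_true_eq,
              decide_eq_false_iff_not, not_or] at h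
            unfold pvKeyLt at hc hmm
            omega
          · exact hmin s (Or.inr hs)

-- bridge: Python's min over a nonempty list is exactly the fold pvFoldB talks about
theorem pv_min2_cons (r x : Int) (xs : List Int) :
    PySem.List.min2? (x :: xs) (fun s => |r - s|) (fun s => s) =
    List.foldl
      (fun (acc : Option Int) y =>
        match acc with
        | none => some y
        | some mm =>
          if (decide (|r - y| < |r - mm|) || !decide (|r - mm| < |r - y|) && decide (y < mm)) = true
          then some y else some mm)
      (some x) xs := by
  unfold PySem.List.min2?
  rw [List.foldl_cons]
  congr 1
  funext acc y
  cases acc <;> rfl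

theorem pvB_best (r : Int) (l : List Int) (h : l ≠ []) : pvIsBest r l (snap_to_steps_py_alt r l) := by
  obtain ⟨x, xs, rfl⟩ := List.exists_cons_of_ne_nil h
  unfold snap_to_steps_py_alt
  rw [if_neg h, pv_min2_cons r x xs]
  obtain ⟨m', hm', hmem, hmin⟩ := pvFoldB r xs x
  rw [hm']
  constructor
  · rcases hmem with h' | h' <;> simp [h']
  · intro s hs
    rcases List.mem_cons.mp hs with hs | hs
    · exact hmin s (Or.inl hs)
    · exact hmin s (Or.inr hs)

-- ===== VERDICT (by name: the statement is the Claim_ definition above) =====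
theorem snap_to_steps_py_spec : Claim_equal_snap_to_steps_py := by
  intro r l _
  unfold Spec_snap_to_steps_py
  by_cases h : l = []
  · subst h; rfl
  · exact pvIsBest_unique r l _ _ (pvA_best r l h) (pvB_best r l h)
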